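-- pv_equiv track=rewrite | github.com/dtdev-hub/leetcode-75 | 1679-max-number-of-k-sum-pairs.py | maxOperations_Counter_2
-- ===== SOURCE A (Python) =====
-- from typing import List
-- from collections import Counter
--
-- def maxOperations_Counter_2(nums: List[int], k: int) -> int:
--     """
--     Approach 1: Using Counter (Hash Map)
--     Time: O(n), Space: O(n)
--     """
--     count = Counter(nums)
--     operations = 0
--
--     for num in count:
--         complement = k - num
--
--         if num == complement:
--             # Special case: num + num = k
--             operations += count[num] // 2
--         elif num < complement and complement in count:
--             # Normal case: avoid double counting by only processing when num < complement
--             operations += min(count[num], count[complement])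
--
--     return operations
-- ===== SOURCE B (Python) =====
-- from typing import List
--
-- def maxOperations_Counter_2(nums: List[int], k: int) -> int:
--     """
--     One-pass greedy: keep a dict of still-unmatched values; each number
--     either pairs with an earlier unmatched complement or waits itself.
--     """
--     unmatched = {}
--     ops = 0
--     for x in nums:
--         c = k - x
--         if unmatched.get(c, 0) > 0:
--             unmatched[c] -= 1
--             ops += 1
--         else:
--             unmatched[x] = unmatched.get(x, 0) + 1
--     return ops
-- ===== Notes on version B (the rewrite author's own statement) =====
-- stated objective: alternative
-- what changed: Replaces the two-phase Counter build plus distinct-key/complement scan by a single greedy pass that pairs each element with an earlier unmatched complement in one dict.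
import Mathlib
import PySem

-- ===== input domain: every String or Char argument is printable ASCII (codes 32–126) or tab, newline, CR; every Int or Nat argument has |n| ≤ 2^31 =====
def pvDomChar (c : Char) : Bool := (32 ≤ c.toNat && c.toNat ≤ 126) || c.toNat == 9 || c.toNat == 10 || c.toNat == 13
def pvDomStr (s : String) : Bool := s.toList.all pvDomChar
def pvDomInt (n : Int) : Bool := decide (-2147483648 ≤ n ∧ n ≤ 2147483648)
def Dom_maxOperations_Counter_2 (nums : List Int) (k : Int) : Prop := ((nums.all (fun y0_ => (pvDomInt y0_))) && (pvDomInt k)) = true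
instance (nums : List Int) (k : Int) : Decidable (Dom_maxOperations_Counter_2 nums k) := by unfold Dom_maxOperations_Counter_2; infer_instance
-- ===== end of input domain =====

-- B replaces the Counter-then-distinct-key/complement scan by a single greedy
-- pass pairing each element with an earlier unmatched complement (alternative
-- decomposition, same O(n) cost; neither version mutates its input).

-- ===== PORT A =====
def maxOperations_Counter_2 (nums : List Int) (k : Int) : Int :=
  let count : PySem.Dict Int Int := PySem.Dict.counter nums
  count.keys.foldl (fun operations num =>
    let complement := k - num
    if num = complement then
      operations + PySem.Int.floordiv (count.getD num 0) 2
    else if num < complement ∧ count.contains complement = true then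
      operations + min (count.getD num 0) (count.getD complement 0)
    else operations) 0

-- ===== PORT B =====
def maxOperations_Counter_2_alt (nums : List Int) (k : Int) : Int :=
  (nums.foldl (fun st x =>
      let c := k - x
      if 0 < st.2.getD c 0 then
        (st.1 + 1, st.2.insert c (st.2.getD c 0 - 1))
      else
        (st.1, st.2.insert x (st.2.getD x 0 + 1)))
    ((0 : Int), (PySem.Dict.empty : PySem.Dict Int Int))).1

-- ===== PRECONDITION & SPEC =====
def Spec_maxOperations_Counter_2 (nums : List Int) (k : Int) (out : Int) : Prop := out = maxOperations_Counter_2_alt nums k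
instance (nums : List Int) (k : Int) (out : Int) : Decidable (Spec_maxOperations_Counter_2 nums k out) := by unfold Spec_maxOperations_Counter_2; infer_instance

-- ===== CLAIM (what is proved, stated in full; the proofs are below) =====
def Claim_equal_maxOperations_Counter_2 : Prop := ∀ (nums : List Int) (k : Int), Dom_maxOperations_Counter_2 nums k → Spec_maxOperations_Counter_2 nums k (maxOperations_Counter_2 nums k)

-- ===== LEMMAS AND PROOFS =====

-- Per-distinct-value contribution of A's loop body (as a function of the list).
def pvContrib (l : List Int) (k num : Int) : Int :=
  if num = k - num then PySem.Int.floordiv ((l.count num : Int)) 2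
  else if num < k - num ∧ (k - num) ∈ l then
    min ((l.count num : Int)) ((l.count (k - num) : Int))
  else 0

-- The common value both programs compute.
def pvF (l : List Int) (k : Int) : Int := ∑ v ∈ l.toFinset, pvContrib l k v

-- Number of still-unmatched copies of v after B's greedy pass over l.
def pvG (l : List Int) (k v : Int) : Int :=
  if v = k - v then (l.count v : Int) % 2
  else max ((l.count v : Int) - (l.count (k - v) : Int)) 0

lemma pvContrib_of_not_mem (l : List Int) (k v : Int) (h : v ∉ l) : pvContrib l k v = 0 := by
  have hc : l.count v = 0 := List.count_eq_zero.mpr h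
  have hn : (l.count (k - v) : Int) ≥ 0 := by positivity
  unfold pvContrib
  split_ifs with h1 h2
  · simp [hc, PySem.Int.floordiv]
  · simp [hc]
  · rfl

lemma pvCount_append (l : List Int) (x v : Int) :
    ((l ++ [x]).count v : Int) = (l.count v : Int) + (if v = x then 1 else 0) := by
  rcases eq_or_ne v x with h | h
  · simp [h, List.count_append]
  · simp [List.count_append, h, Ne.symm h]

lemma pvContrib_else (l : List Int) (k v : Int) (h1 : v ≠ k - v) (h2 : ¬ v < k - v) :
    pvContrib l k v = 0 := by
  unfold pvContrib
  rw [if_neg h1, if_neg (fun hh => h2 hh.1)]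

lemma pvContrib_append_other (l : List Int) (k x v : Int) (hv : v ≠ x) (hkv : k - v ≠ x) :
    pvContrib (l ++ [x]) k v = pvContrib l k v := by
  unfold pvContrib
  simp only [pvCount_append, if_neg hv, if_neg hkv, add_zero, List.mem_append,
    List.mem_singleton, or_iff_left hkv]

lemma pvF_append (l : List Int) (k x : Int) :
    pvF (l ++ [x]) k = pvF l k + (if 0 < pvG l k (k - x) then 1 else 0) := by
  have hkk : k - (k - x) = x := by ring
  have hc0 : 0 ≤ (l.count x : Int) := by positivity
  have hb0 : 0 ≤ (l.count (k - x) : Int) := by positivity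
  set s : Finset Int := insert x (insert (k - x) l.toFinset) with hs
  have h1 : pvF l k = ∑ v ∈ s, pvContrib l k v := by
    apply Finset.sum_subset
    · intro v hv
      simp only [hs, Finset.mem_insert]
      exact Or.inr (Or.inr hv)
    · intro v _ hnv
      exact pvContrib_of_not_mem _ _ _ (fun hm => hnv (List.mem_toFinset.mpr hm))
  have h2 : pvF (l ++ [x]) k = ∑ v ∈ s, pvContrib (l ++ [x]) k v := by
    apply Finset.sum_subset
    · intro v hv
      simp only [List.toFinset_append, Finset.mem_union, List.mem_toFinset, List.toFinset_cons,
        List.toFinset_nil, insert_empty_eq, Finset.mem_singleton] at hv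
      simp only [hs, Finset.mem_insert, List.mem_toFinset]
      tauto
    · intro v _ hnv
      apply pvContrib_of_not_mem
      intro hm
      exact hnv (by simp [List.mem_append] at hm ⊢; tauto)
  have hsplit : ∑ v ∈ s, pvContrib (l ++ [x]) k v
      = ∑ v ∈ s, pvContrib l k v + ∑ v ∈ s, (pvContrib (l ++ [x]) k v - pvContrib l k v) := by
    rw [Finset.sum_sub_distrib]; ring
  rw [h1, h2, hsplit]
  congr 1
  rcases lt_trichotomy x (k - x) with hlt | heq | hgt
  · -- x < k - x : only the term at x changes
    rw [Finset.sum_eq_single x ?hside (fun hx => absurd (by simp [hs] : x ∈ s) hx)]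
    case hside =>
      intro b _ hbne
      refine sub_eq_zero.mpr ?_
      by_cases hbc : b = k - x
      · subst hbc
        rw [pvContrib_else (l ++ [x]) k (k - x) (by omega) (by omega),
          pvContrib_else l k (k - x) (by omega) (by omega)]
      · exact pvContrib_append_other l k x b hbne (by omega)
    have e1 : pvContrib (l ++ [x]) k x
        = if (k - x) ∈ l then min ((l.count x : Int) + 1) ((l.count (k - x) : Int)) else 0 := by
      unfold pvContrib
      rw [if_neg (by omega : ¬ x = k - x)]
      simp only [pvCount_append, if_neg (by omega : ¬ k - x = x), add_zero,
        List.mem_append, List.mem_singleton, or_iff_left (by omega : ¬ k - x = x)]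
      by_cases hm : (k - x) ∈ l
      · rw [if_pos ⟨hlt, hm⟩, if_pos hm]; norm_num
      · rw [if_neg (fun hh => hm hh.2), if_neg hm]
    have e2 : pvContrib l k x
        = if (k - x) ∈ l then min ((l.count x : Int)) ((l.count (k - x) : Int)) else 0 := by
      unfold pvContrib
      rw [if_neg (by omega : ¬ x = k - x)]
      by_cases hm : (k - x) ∈ l
      · rw [if_pos ⟨hlt, hm⟩, if_pos hm]
      · rw [if_neg (fun hh => hm hh.2), if_neg hm]
    have e3 : pvG l k (k - x) = max ((l.count (k - x) : Int) - (l.count x : Int)) 0 := by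
      unfold pvG
      rw [hkk, if_neg (by omega : ¬ k - x = x)]
    rw [e1, e2, e3]
    by_cases hm : (k - x) ∈ l
    · rw [if_pos hm, if_pos hm]
      omega
    · have : (l.count (k - x) : Int) = 0 := by simp [List.count_eq_zero.mpr hm]
      rw [if_neg hm, if_neg hm]
      omega
  · -- x is its own complement
    rw [Finset.sum_eq_single x
      (fun b _ hbne => sub_eq_zero.mpr (pvContrib_append_other l k x b hbne (by omega)))
      (fun hx => absurd (by simp [hs] : x ∈ s) hx)]
    have e1 : pvContrib (l ++ [x]) k x = PySem.Int.floordiv ((l.count x : Int) + 1) 2 := by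
      unfold pvContrib
      rw [if_pos (by omega : x = k - x)]
      simp only [pvCount_append]
      norm_num
    have e2 : pvContrib l k x = PySem.Int.floordiv ((l.count x : Int)) 2 := by
      unfold pvContrib
      rw [if_pos (by omega : x = k - x)]
    have e3 : pvG l k (k - x) = (l.count x : Int) % 2 := by
      unfold pvG
      rw [hkk]
      rw [if_pos (by omega : k - x = x), (by omega : k - x = x)]
    rw [e1, e2, e3, PySem.Int.floordiv_eq_ediv_of_pos (by norm_num),
      PySem.Int.floordiv_eq_ediv_of_pos (by norm_num)]
    omega
  · -- k - x < x : only the term at k - x changes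
    rw [Finset.sum_eq_single (k - x) ?hside
      (fun hx => absurd (by simp [hs] : (k - x) ∈ s) hx)]
    case hside =>
      intro b _ hbne
      refine sub_eq_zero.mpr ?_
      by_cases hbx : b = x
      · subst hbx
        rw [pvContrib_else (l ++ [b]) k b (by omega) (by omega),
          pvContrib_else l k b (by omega) (by omega)]
      · exact pvContrib_append_other l k x b hbx (by omega)
    have e1 : pvContrib (l ++ [x]) k (k - x)
        = min ((l.count (k - x) : Int)) ((l.count x : Int) + 1) := by
      unfold pvContrib
      rw [hkk]
      rw [if_neg (by omega : ¬ k - x = x)]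
      simp only [pvCount_append, if_neg (by omega : ¬ k - x = x), add_zero,
        List.mem_append, List.mem_singleton]
      rw [if_pos ⟨by omega, Or.inr trivial⟩]
      norm_num
    have e2 : pvContrib l k (k - x) = if x ∈ l then min ((l.count (k - x) : Int)) ((l.count x : Int)) else 0 := by
      unfold pvContrib
      rw [hkk]
      rw [if_neg (by omega : ¬ k - x = x)]
      by_cases hm : x ∈ l
      · rw [if_pos ⟨by omega, hm⟩, if_pos hm]
      · rw [if_neg (fun hh => hm hh.2), if_neg hm]
    have e3 : pvG l k (k - x) = max ((l.count (k - x) : Int) - (l.count x : Int)) 0 := by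
      unfold pvG
      rw [hkk, if_neg (by omega : ¬ k - x = x)]
    rw [e1, e2, e3]
    by_cases hm : x ∈ l
    · rw [if_pos hm]
      omega
    · have : (l.count x : Int) = 0 := by simp [List.count_eq_zero.mpr hm]
      rw [if_neg hm]
      omega

lemma pvG_append_match (l : List Int) (k x v : Int) (h : 0 < pvG l k (k - x)) :
    pvG (l ++ [x]) k v = if v = k - x then pvG l k (k - x) - 1 else pvG l k v := by
  have hkk : k - (k - x) = x := by ring
  by_cases hsx : k - x = x
  · rw [hsx] at h ⊢
    by_cases hvx : v = x
    · subst hvx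
      unfold pvG at h ⊢
      simp only [pvCount_append] at h ⊢
      rw [hsx] at h ⊢
      split_ifs at h ⊢ <;> omega
    · have hkv : k - v ≠ x := fun hh => hvx (by omega)
      unfold pvG
      simp only [pvCount_append, if_neg hkv, if_neg hvx, add_zero]
  · by_cases hvx : v = x
    · subst hvx
      have hsv : ¬ v = k - v := fun hh => hsx (by omega)
      have hvv : ¬ k - v = v := fun hh => hsx (by omega)
      unfold pvG at h ⊢
      rw [hkk] at h
      simp only [pvCount_append, if_neg hsv, if_neg hvv, if_neg (fun hh : k - v = k - (k - v) => hvv (by omega))] at h ⊢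
      split_ifs at h ⊢ <;> omega
    · by_cases hvc : v = k - x
      · subst hvc
        unfold pvG at h ⊢
        rw [hkk] at h ⊢
        simp only [pvCount_append] at h ⊢
        split_ifs at h ⊢
        omega
      · have hkv : k - v ≠ x := fun hh => hvc (by omega)
        unfold pvG
        simp only [pvCount_append, if_neg hvx, if_neg hkv, add_zero, if_neg hvc]

lemma pvG_append_wait (l : List Int) (k x v : Int) (h : ¬ 0 < pvG l k (k - x)) :
    pvG (l ++ [x]) k v = if v = x then pvG l k x + 1 else pvG l k v := by
  have hkk : k - (k - x) = x := by ring
  by_cases hsx : k - x = x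
  · rw [hsx] at h
    by_cases hvx : v = x
    · subst hvx
      unfold pvG at h ⊢
      simp only [pvCount_append] at h ⊢
      rw [hsx] at h ⊢
      split_ifs at h ⊢ <;> omega
    · have hkv : k - v ≠ x := fun hh => hvx (by omega)
      unfold pvG
      simp only [pvCount_append, if_neg hvx, if_neg hkv, add_zero]
  · by_cases hvx : v = x
    · subst hvx
      have hsv : ¬ v = k - v := fun hh => hsx (by omega)
      have hvv : ¬ k - v = v := fun hh => hsx (by omega)
      unfold pvG at h ⊢
      rw [hkk] at h
      simp only [pvCount_append, if_neg hsv, if_neg hvv] at h ⊢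
      split_ifs at h ⊢ <;> omega
    · by_cases hvc : v = k - x
      · subst hvc
        unfold pvG at h ⊢
        rw [hkk] at h ⊢
        simp only [pvCount_append] at h ⊢
        split_ifs at h ⊢
        omega
      · have hkv : k - v ≠ x := fun hh => hvc (by omega)
        unfold pvG
        simp only [pvCount_append, if_neg hvx, if_neg hkv, add_zero]

-- B's loop invariant: accumulated ops = pvF, dict entries = pvG.
lemma pvB_invariant (k : Int) (l : List Int) :
    (l.foldl (fun st x =>
      if 0 < st.2.getD (k - x) 0 then
        (st.1 + 1, st.2.insert (k - x) (st.2.getD (k - x) 0 - 1))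
      else
        (st.1, st.2.insert x (st.2.getD x 0 + 1)))
      ((0 : Int), (PySem.Dict.empty : PySem.Dict Int Int))).1 = pvF l k ∧
    ∀ v, (l.foldl (fun st x =>
      if 0 < st.2.getD (k - x) 0 then
        (st.1 + 1, st.2.insert (k - x) (st.2.getD (k - x) 0 - 1))
      else
        (st.1, st.2.insert x (st.2.getD x 0 + 1)))
      ((0 : Int), (PySem.Dict.empty : PySem.Dict Int Int))).2.getD v 0 = pvG l k v := by
  induction l using List.reverseRecOn with
  | nil =>
    refine ⟨by simp [pvF], fun v => ?_⟩
    simp [pvG, PySem.Dict.getD_empty]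
  | append_singleton l x ih =>
    obtain ⟨ih1, ih2⟩ := ih
    refine ⟨?_, fun v => ?_⟩
    · simp only [List.foldl_append, List.foldl_cons, List.foldl_nil]
      rw [ih2 (k - x)]
      by_cases hm : 0 < pvG l k (k - x)
      · rw [if_pos hm]
        simp only [pvF_append, if_pos hm]
        exact congrArg (· + 1) ih1
      · rw [if_neg hm]
        simp only [pvF_append, if_neg hm, add_zero]
        exact ih1
    · simp only [List.foldl_append, List.foldl_cons, List.foldl_nil]
      rw [ih2 (k - x)]
      by_cases hm : 0 < pvG l k (k - x)
      · rw [if_pos hm]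
        simp only []
        rw [PySem.Dict.getD_insert, pvG_append_match l k x v hm]
        split_ifs with h
        · rfl
        · exact ih2 v
      · rw [if_neg hm]
        simp only []
        rw [PySem.Dict.getD_insert, pvG_append_wait l k x v hm, ih2 x]
        split_ifs with h
        · rfl
        · exact ih2 v

lemma pvA_eq_pvF (nums : List Int) (k : Int) : maxOperations_Counter_2 nums k = pvF nums k := by
  unfold maxOperations_Counter_2
  have hfun : (fun (operations num : Int) =>
      let complement := k - num
      if num = complement then
        operations + PySem.Int.floordiv ((PySem.Dict.counter nums).getD num 0) 2
      else if num < complement ∧ (PySem.Dict.counter nums).contains complement = true then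
        operations + min ((PySem.Dict.counter nums).getD num 0) ((PySem.Dict.counter nums).getD complement 0)
      else operations)
      = fun operations num => operations + pvContrib nums k num := by
    funext ops num
    simp only [PySem.Dict.getD_counter, PySem.Dict.contains_counter, List.contains_eq_mem,
      decide_eq_true_eq]
    unfold pvContrib
    split_ifs <;> simp
  simp only []
  rw [hfun, PySem.Dict.keys_counter, PySem.List.foldl_add, zero_add]
  have hnd : (PySem.Set.ofList nums).Nodup := PySem.Set.nodup_ofList nums
  rw [← List.sum_toFinset _ hnd]
  have hfs : (PySem.Set.ofList nums).toFinset = nums.toFinset := by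
    apply Finset.ext
    intro v
    simp [PySem.Set.mem_ofList]
  rw [hfs]
  rfl

-- ===== VERDICT (by name: the statement is the Claim_ definition above) =====
theorem maxOperations_Counter_2_spec : Claim_equal_maxOperations_Counter_2 := by
  intro nums k _
  unfold Spec_maxOperations_Counter_2
  rw [pvA_eq_pvF]
  exact ((pvB_invariant k nums).1).symm
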